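-- pv_equiv track=rewrite | github.com/AlisonMacFadyen/SCCmecExtractor | src/sccmecextractor/extract_SCCmec.py | _count_distinct_loci
-- ===== SOURCE A (Python) =====
-- def _count_distinct_loci(coords):
--     """Count distinct genomic loci from a collection of overlapping coordinates.
--
--     Merges overlapping (start, end) intervals and returns the number of
--     non-overlapping clusters.  This prevents multiple BLAST hits against
--     the same gene (from different reference sequences) being counted as
--     separate copies.
--     """
--     if not coords:
--         return 0
--     sorted_coords = sorted(coords)
--     loci = 1
--     _, current_end = sorted_coords[0]
--     for start, end in sorted_coords[1:]:
--         if start > current_end: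
--             loci += 1
--             current_end = end
--         else:
--             current_end = max(current_end, end)
--     return loci
-- ===== SOURCE B (Python) =====
-- def _count_distinct_loci(coords):
--     """Count merged interval clusters: sort, tabulate the running maximum end
--     ("reach") as a prefix list, then count the starts that jump past the reach
--     of everything before them; each such jump opens a new locus."""
--     xs = sorted(coords)
--     reach = []
--     for _, end in xs:
--         reach.append(max(reach[-1], end) if reach else end)
--     return sum(1 for (start, _), r in zip(xs[1:], reach) if start > r) + (0 if not xs else 1)
-- ===== Notes on version B (the rewrite author's own statement) =====
-- stated objective: alternative
-- what changed: Replaces A's stateful merge loop (locus counter plus a current_end that is conditionally reset or maxed) with a prefix-maximum 'reach' table over the sorted intervals and a single comprehension counting the starts that exceed the reach of everything before them.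
import Mathlib
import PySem

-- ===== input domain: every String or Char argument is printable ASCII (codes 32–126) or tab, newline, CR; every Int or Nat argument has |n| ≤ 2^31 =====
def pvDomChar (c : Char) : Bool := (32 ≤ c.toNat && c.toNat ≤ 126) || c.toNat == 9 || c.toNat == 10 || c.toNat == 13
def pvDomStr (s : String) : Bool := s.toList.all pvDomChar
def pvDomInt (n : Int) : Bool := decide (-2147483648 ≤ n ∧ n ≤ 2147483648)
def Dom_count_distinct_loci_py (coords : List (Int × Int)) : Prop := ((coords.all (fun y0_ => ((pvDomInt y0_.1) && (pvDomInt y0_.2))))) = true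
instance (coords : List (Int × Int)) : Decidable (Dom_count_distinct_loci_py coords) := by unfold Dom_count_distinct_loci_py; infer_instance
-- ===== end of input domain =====

-- B replaces A's stateful merge loop (locus counter + current_end with reset) by a
-- prefix-maximum "reach" table plus a one-line count of the starts that jump past it
-- (objective: alternative decomposition, same sort-dominated cost).

-- ===== PORT A =====
-- literal transliteration of _count_distinct_loci: sort, then a fold carrying (loci, current_end)
def count_distinct_loci_py (coords : List (Int × Int)) : Int :=
  if coords = [] then 0
  else
    match PySem.List.sorted2 coords Prod.fst Prod.snd with
    | [] => 0   -- unreachable: sorted2 of a nonempty list is nonempty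
    | p0 :: rest =>
      (rest.foldl
        (fun (st : Int × Int) pe =>
          if pe.1 > st.2 then (st.1 + 1, pe.2) else (st.1, max st.2 pe.2))
        (1, p0.2)).1

-- ===== PORT B =====
-- literal transliteration of Source B: sort, build the prefix-max "reach" list by appending
-- (reach[-1] is getLast?), then count the starts in xs[1:] beyond the reach before them
def count_distinct_loci_py_alt (coords : List (Int × Int)) : Int :=
  let xs := PySem.List.sorted2 coords Prod.fst Prod.snd
  let reach := xs.foldl
    (fun (r : List Int) pe =>
      r ++ [match r.getLast? with | some m => max m pe.2 | none => pe.2]) []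
  ((xs.drop 1).zip reach).foldl
      (fun (acc : Int) pr => if pr.1.1 > pr.2 then acc + 1 else acc) 0
    + (if xs = [] then 0 else 1)

-- ===== PRECONDITION & SPEC =====
def Spec_count_distinct_loci_py (coords : List (Int × Int)) (out : Int) : Prop := out = count_distinct_loci_py_alt coords
instance (coords : List (Int × Int)) (out : Int) : Decidable (Spec_count_distinct_loci_py coords out) := by unfold Spec_count_distinct_loci_py; infer_instance

-- ===== CLAIM (what is proved, stated in full; the proofs are below) =====
def Claim_equal_count_distinct_loci_py : Prop := ∀ (coords : List (Int × Int)), Dom_count_distinct_loci_py coords → Spec_count_distinct_loci_py coords (count_distinct_loci_py coords)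

-- ===== LEMMAS AND PROOFS =====

-- reference count: scan with running prefix maximum m, add 1 whenever a start exceeds m
def pvG (m : Int) : List (Int × Int) → Int
  | [] => 0
  | p :: t => (if p.1 > m then (1 : Int) else 0) + pvG (max m p.2) t

-- running prefix maxima of the ends, seeded with m
def pvScan (m : Int) : List (Int × Int) → List Int
  | [] => []
  | p :: t => max m p.2 :: pvScan (max m p.2) t

-- the strict lexicographic order sorted2 uses on (Int × Int) with keys fst, snd
def pvLexLt (a b : Int × Int) : Bool :=
  decide (a.1 < b.1) || (!decide (b.1 < a.1) && decide (a.2 < b.2))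

lemma pvLexLt_asymm {a b : Int × Int} (h : pvLexLt a b = true) : pvLexLt b a = false := by
  simp [pvLexLt] at *; omega

lemma pvLexLt_trans {a b c : Int × Int} (h1 : pvLexLt a b = true) (h2 : pvLexLt b c = true) :
    pvLexLt a c = true := by
  simp [pvLexLt] at *; omega

lemma pvInsertBy_pairwise (x : Int × Int) (ys : List (Int × Int))
    (h : ys.Pairwise (fun a b => pvLexLt b a = false)) :
    (PySem.List.insertBy pvLexLt x ys).Pairwise (fun a b => pvLexLt b a = false) := by
  induction ys with
  | nil => simp [PySem.List.insertBy]
  | cons y t ih =>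
    rw [List.pairwise_cons] at h
    by_cases hxy : pvLexLt x y = true
    · simp only [PySem.List.insertBy, hxy, if_true]
      refine List.Pairwise.cons ?_ (List.pairwise_cons.mpr h)
      intro z hz
      rcases List.mem_cons.mp hz with rfl | hzt
      · exact pvLexLt_asymm hxy
      · by_contra hc
        have hzx : pvLexLt z x = true := by
          cases hzx : pvLexLt z x
          · exact absurd hzx hc
          · rfl
        have := pvLexLt_trans hzx hxy
        rw [h.1 z hzt] at this
        exact Bool.false_ne_true this
    · simp only [PySem.List.insertBy, hxy]
      refine List.Pairwise.cons ?_ (ih h.2)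
      intro z hz
      rcases (PySem.List.mem_insertBy pvLexLt x z t).mp hz with rfl | hzt
      · exact Bool.eq_false_iff.mpr hxy
      · exact h.1 z hzt

lemma pvFoldlInsert_pairwise (l : List (Int × Int)) (acc : List (Int × Int))
    (h : acc.Pairwise (fun a b => pvLexLt b a = false)) :
    (l.foldl (fun acc x => PySem.List.insertBy pvLexLt x acc) acc).Pairwise
      (fun a b => pvLexLt b a = false) := by
  induction l generalizing acc with
  | nil => exact h
  | cons p t ih => exact ih _ (pvInsertBy_pairwise p acc h)

-- sorted2 with keys (fst, snd) has non-decreasing first components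
lemma pvSorted2_fst_mono (xs : List (Int × Int)) :
    (PySem.List.sorted2 xs Prod.fst Prod.snd).Pairwise (fun p q => p.1 ≤ q.1) := by
  have e : PySem.List.sorted2 xs Prod.fst Prod.snd
      = xs.foldl (fun acc x => PySem.List.insertBy pvLexLt x acc) [] := rfl
  have hp := pvFoldlInsert_pairwise xs [] (List.Pairwise.nil)
  rw [e]
  refine hp.imp ?_
  intro a b hab
  simp [pvLexLt] at hab
  omega

-- B's reach-building fold appends prefix maxima
lemma pvReach_build (l : List (Int × Int)) (acc : List Int) (m : Int)
    (h : acc.getLast? = some m) :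
    l.foldl (fun (r : List Int) pe =>
        r ++ [match r.getLast? with | some m => max m pe.2 | none => pe.2]) acc
      = acc ++ pvScan m l := by
  induction l generalizing acc m with
  | nil => simp [pvScan]
  | cons p t ih =>
    simp only [List.foldl_cons, h]
    rw [ih (acc ++ [max m p.2]) (max m p.2) (by simp)]
    simp [pvScan]

-- B's zip-count equals the reference count
lemma pvZipCount (t : List (Int × Int)) (m : Int) (acc : Int) :
    (t.zip (m :: pvScan m t)).foldl
        (fun (acc : Int) pr => if pr.1.1 > pr.2 then acc + 1 else acc) acc
      = acc + pvG m t := by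
  induction t generalizing m acc with
  | nil => simp [pvG]
  | cons p t' ih =>
    simp only [pvScan, List.zip_cons_cons, List.foldl_cons, pvG]
    rw [ih]
    split_ifs <;> omega

-- A's merge fold equals the reference count (needs non-decreasing starts; b is a
-- strict lower bound on every remaining start with b ≤ nothing lost: max ce b tracked)
lemma pvMerge_eq (l : List (Int × Int)) (loci ce b : Int)
    (hb : ∀ p ∈ l, b < p.1)
    (hs : l.Pairwise (fun p q => p.1 ≤ q.1)) :
    (l.foldl
        (fun (st : Int × Int) pe =>
          if pe.1 > st.2 then (st.1 + 1, pe.2) else (st.1, max st.2 pe.2))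
        (loci, ce)).1
      = loci + pvG (max ce b) l := by
  induction l generalizing loci ce b with
  | nil => simp [pvG]
  | cons p t ih =>
    rw [List.pairwise_cons] at hs
    have hbp : b < p.1 := hb p (List.mem_cons_self)
    simp only [List.foldl_cons, pvG]
    by_cases hgt : p.1 > ce
    · have hgt' : p.1 > max ce b := by omega
      simp only [hgt, hgt', if_true]
      rw [ih (loci + 1) p.2 (max ce b)
            (fun q hq => lt_of_lt_of_le hgt' (hs.1 q hq)) hs.2]
      have : max p.2 (max ce b) = max (max ce b) p.2 := max_comm _ _
      rw [this]; omega
    · have hle : ¬ p.1 > max ce b :=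
        not_lt.mpr (le_trans (not_lt.mp hgt) (le_max_left _ _))
      simp only [hgt, hle, if_false]
      rw [ih loci (max ce p.2) b (fun q hq => hb q (List.mem_cons_of_mem p hq)) hs.2]
      have : max (max ce p.2) b = max (max ce b) p.2 := by
        rw [max_right_comm]
      rw [this]; omega

-- sorted2 of a nonempty list is nonempty
lemma pvSorted2_ne_nil (xs : List (Int × Int)) (h : xs ≠ []) :
    PySem.List.sorted2 xs Prod.fst Prod.snd ≠ [] := by
  intro hnil
  have := PySem.List.sorted2_perm xs Prod.fst Prod.snd false
  rw [hnil] at this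
  exact h (this.symm.eq_nil)

-- ===== VERDICT (by name: the statement is the Claim_ definition above) =====
theorem count_distinct_loci_py_spec : Claim_equal_count_distinct_loci_py := by
  intro coords _dom
  unfold Spec_count_distinct_loci_py count_distinct_loci_py count_distinct_loci_py_alt
  by_cases hc : coords = []
  · subst hc
    simp [PySem.List.sorted2]
  · simp only [hc, if_false]
    obtain ⟨p0, rest, hys⟩ :
        ∃ p0 rest, PySem.List.sorted2 coords Prod.fst Prod.snd = p0 :: rest := by
      cases h : PySem.List.sorted2 coords Prod.fst Prod.snd with
      | nil => exact absurd h (pvSorted2_ne_nil coords hc)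
      | cons a l => exact ⟨a, l, rfl⟩
    rw [hys]
    dsimp only
    have hmono := pvSorted2_fst_mono coords
    rw [hys, List.pairwise_cons] at hmono
    -- A's side
    have hA := pvMerge_eq rest 1 p0.2 (min p0.2 (p0.1 - 1))
      (fun q hq => lt_of_le_of_lt (min_le_right _ _) (by
        have := hmono.1 q hq; omega)) hmono.2
    have hmax : max p0.2 (min p0.2 (p0.1 - 1)) = p0.2 := by
      rcases le_total p0.2 (p0.1 - 1) with h | h <;> simp [h]
    rw [hmax] at hA
    -- B's side: reach list is p0.2 :: pvScan p0.2 rest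
    have hreach :
        (p0 :: rest).foldl
          (fun (r : List Int) pe =>
            r ++ [match r.getLast? with | some m => max m pe.2 | none => pe.2]) []
          = p0.2 :: pvScan p0.2 rest := by
      simp only [List.foldl_cons, List.getLast?_nil, List.nil_append]
      exact pvReach_build rest [p0.2] p0.2 rfl
    rw [hA, hreach]
    simp only [List.drop_one, List.tail_cons, reduceCtorEq, if_false]
    rw [pvZipCount rest p0.2 0]
    omega
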